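-- pv_equiv track=rewrite | github.com/dGameBoy101b/thinkomino-solver | list_rotator.py | max_rotations
-- ===== SOURCE A (Python) =====
-- from math import copysign
--
-- def constrain_step(iterable:tuple, step:int)->int:
-- 	return 0 if len(iterable) < 1 else int(copysign(abs(step) % len(iterable), step))
--
-- def max_rotations(iterable:tuple, step:int)->int:
-- 	iterable_len = len(iterable)
-- 	if iterable_len < 1:
-- 		return 1
-- 	step = constrain_step(iterable, step)
-- 	if step == 0:
-- 		return 1
-- 	abs_step = abs(step)
-- 	loops = 1
-- 	while iterable_len * loops % abs_step > 0:
-- 		loops += 1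
-- 	return iterable_len * loops // abs_step
-- ===== SOURCE B (Python) =====
-- from math import gcd
--
-- def max_rotations(iterable, step):
--     n = len(iterable)
--     return 1 if n < 1 else n // gcd(n, abs(step))
-- ===== Notes on version B (the rewrite author's own statement) =====
-- stated objective: faster
-- what changed: replaces the trial-multiplication while loop (incrementing loops until iterable_len*loops is divisible by the step) with the closed form n // gcd(n, abs(step))
import Mathlib
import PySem

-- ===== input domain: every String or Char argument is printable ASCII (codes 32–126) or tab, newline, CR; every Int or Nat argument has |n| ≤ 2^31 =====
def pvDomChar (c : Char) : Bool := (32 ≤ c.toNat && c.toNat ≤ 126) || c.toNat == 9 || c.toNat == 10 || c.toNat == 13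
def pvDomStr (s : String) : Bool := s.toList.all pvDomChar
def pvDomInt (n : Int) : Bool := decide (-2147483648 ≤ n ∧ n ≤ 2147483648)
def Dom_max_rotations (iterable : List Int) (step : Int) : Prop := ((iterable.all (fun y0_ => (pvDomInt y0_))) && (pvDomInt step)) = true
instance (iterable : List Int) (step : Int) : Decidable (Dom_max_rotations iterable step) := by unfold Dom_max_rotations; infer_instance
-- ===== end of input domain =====

-- B replaces A's trial-multiplication while loop by the closed form n // gcd(n, abs(step)).

-- ===== PORT A =====
-- int(copysign(abs(step) % len, step)) : exact here (|step| % len < len ≤ 2^31 < 2^53, so the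
-- float round-trip is exact); copysign attaches step's sign to the non-negative remainder.
def constrain_step (iterable : List Int) (step : Int) : Int :=
  if (iterable.length : Int) < 1 then 0
  else
    let r := PySem.Int.mod |step| (iterable.length : Int)
    if step < 0 then -r else r

-- the while loop of A, fuel-bounded; fuel abs_step.toNat always suffices (proved below)
def findLoopsA (n a : Int) : Nat → Int → Int
  | 0, loops => loops
  | f+1, loops => if PySem.Int.mod (n * loops) a > 0 then findLoopsA n a f (loops + 1) else loops

def max_rotations (iterable : List Int) (step : Int) : Int :=
  let iterable_len := (iterable.length : Int)
  if iterable_len < 1 then 1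
  else
    let step := constrain_step iterable step
    if step = 0 then 1
    else
      let abs_step := |step|
      let loops := findLoopsA iterable_len abs_step abs_step.toNat 1
      PySem.Int.floordiv (iterable_len * loops) abs_step

-- ===== PORT B =====
def max_rotations_alt (iterable : List Int) (step : Int) : Int :=
  let n := (iterable.length : Int)
  if n < 1 then 1
  else PySem.Int.floordiv n (Int.gcd n |step|)

-- ===== PRECONDITION & SPEC =====
def Spec_max_rotations (iterable : List Int) (step : Int) (out : Int) : Prop := out = max_rotations_alt iterable step
instance (iterable : List Int) (step : Int) (out : Int) : Decidable (Spec_max_rotations iterable step out) := by unfold Spec_max_rotations; infer_instance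

-- ===== CLAIM (what is proved, stated in full; the proofs are below) =====
def Claim_equal_max_rotations : Prop := ∀ (iterable : List Int) (step : Int), Dom_max_rotations iterable step → Spec_max_rotations iterable step (max_rotations iterable step)

-- ===== LEMMAS AND PROOFS =====

-- findLoopsA returns the least loops ≥ l with n * loops % a = 0, provided one exists within fuel.
lemma findLoopsA_spec (n a : Int) (ha : 0 < a) :
    ∀ (f : Nat) (l : Int),
      (∃ k : Int, l ≤ k ∧ k ≤ l + f ∧ n * k % a = 0) →
      l ≤ findLoopsA n a f l ∧ n * findLoopsA n a f l % a = 0 ∧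
        ∀ j, l ≤ j → j < findLoopsA n a f l → n * j % a ≠ 0 := by
  intro f
  induction f with
  | zero =>
    intro l ⟨k, hk1, hk2, hk3⟩
    have : k = l := by omega
    subst this
    simp [findLoopsA, hk3]
    omega
  | succ f ih =>
    intro l ⟨k, hk1, hk2, hk3⟩
    rw [findLoopsA]
    rw [PySem.Int.mod_eq_emod_of_pos ha]
    by_cases hc : n * l % a > 0
    · simp only [hc, if_true]
      have hkl : k ≠ l := by rintro rfl; omega
      obtain ⟨h1, h2, h3⟩ := ih (l + 1) ⟨k, by omega, by omega, hk3⟩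
      refine ⟨by omega, h2, ?_⟩
      intro j hj1 hj2
      rcases eq_or_lt_of_le hj1 with rfl | hj
      · omega
      · exact h3 j (by omega) hj2
    · simp only [hc, if_false]
      have hnn : 0 ≤ n * l % a := Int.emod_nonneg _ (by omega)
      exact ⟨le_refl _, by omega, by intro j h1 h2; omega⟩

-- A's loop computes n * (least multiple) // a = n // gcd(n, a).
lemma loop_result (n a : Int) (hn : 0 < n) (ha : 0 < a) :
    PySem.Int.floordiv (n * findLoopsA n a a.toNat 1) a = PySem.Int.floordiv n (Int.gcd n a) := by
  set g : Int := (Int.gcd n a : Int) with hg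
  have hgN : 0 < Int.gcd n a := Int.gcd_pos_of_ne_zero_left a (by omega)
  have hgpos : 0 < g := by rw [hg]; exact_mod_cast hgN
  obtain ⟨n', hn'⟩ : g ∣ n := Int.gcd_dvd_left n a
  obtain ⟨a', ha'⟩ : g ∣ a := Int.gcd_dvd_right n a
  have hn'pos : 0 < n' := by nlinarith
  have ha'pos : 0 < a' := by nlinarith
  have hcop : IsCoprime a' n' := by
    rw [Int.isCoprime_iff_gcd_eq_one]
    have h := Int.gcd_div_gcd_div_gcd (i := n) (j := a) hgN
    have e1 : n / g = n' := by rw [hn']; exact Int.mul_ediv_cancel_left _ (by omega)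
    have e2 : a / g = a' := by rw [ha']; exact Int.mul_ediv_cancel_left _ (by omega)
    rw [← hg] at h
    rw [e1, e2] at h
    rw [Int.gcd_comm]
    exact h
  have hmul : n * a' = n' * a := by rw [hn', ha']; ring
  have ha'le : a' ≤ a := by nlinarith
  have hex : ∃ k : Int, (1:Int) ≤ k ∧ k ≤ 1 + (a.toNat : Nat) ∧ n * k % a = 0 :=
    ⟨a', ha'pos, by omega, by rw [hmul]; exact Int.mul_emod_left n' a⟩
  obtain ⟨h1, h2, h3⟩ := findLoopsA_spec n a ha a.toNat 1 hex
  set L := findLoopsA n a a.toNat 1 with hL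
  have hdvd : a ∣ n * L := Int.dvd_of_emod_eq_zero h2
  have hLle : L ≤ a' := by
    by_contra hlt
    exact h3 a' ha'pos (by omega) (by rw [hmul]; exact Int.mul_emod_left n' a)
  have haL : a' ∣ L := by
    have h4 : g * a' ∣ g * (n' * L) := by
      rw [← ha', show g * (n' * L) = (g * n') * L by ring, ← hn']; exact hdvd
    have h5 : a' ∣ n' * L := (mul_dvd_mul_iff_left (by omega : g ≠ 0)).mp h4
    exact hcop.dvd_of_dvd_mul_left h5
  have hLa : L = a' := le_antisymm hLle (Int.le_of_dvd (by omega) haL)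
  rw [PySem.Int.floordiv_eq_ediv_of_pos ha, PySem.Int.floordiv_eq_ediv_of_pos hgpos, hLa]
  rw [show n * a' = n' * a by rw [hmul], Int.mul_ediv_cancel _ (by omega : a ≠ 0)]
  rw [hn', Int.mul_ediv_cancel_left _ (by omega : g ≠ 0)]

lemma gcd_emod_right_aux (n s : Int) : Int.gcd n (s % n) = Int.gcd n s := by
  apply Nat.dvd_antisymm
  · apply Int.dvd_gcd (Int.gcd_dvd_left n (s % n))
    have h2 : (↑(Int.gcd n (s % n)) : Int) ∣ s - n * (s / n) := by
      rw [← Int.emod_def]; exact Int.gcd_dvd_right n (s % n)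
    have := dvd_add (dvd_mul_of_dvd_left (Int.gcd_dvd_left n (s % n)) (s / n)) h2
    simpa using this
  · apply Int.dvd_gcd (Int.gcd_dvd_left n s)
    rw [Int.emod_def]
    exact dvd_sub (Int.gcd_dvd_right n s) (dvd_mul_of_dvd_left (Int.gcd_dvd_left n s) (s / n))

-- ===== VERDICT (by name: the statement is the Claim_ definition above) =====
theorem max_rotations_spec : Claim_equal_max_rotations := by
  intro iterable step _
  unfold Spec_max_rotations
  by_cases h0 : ((iterable.length : Int) < 1)
  · simp [max_rotations, max_rotations_alt, h0]
  · have hNpos : 0 < (iterable.length : Int) := by omega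
    set n : Int := (iterable.length : Int) with hn
    set r : Int := PySem.Int.mod |step| n with hrdef
    have hre : r = |step| % n := by rw [hrdef, PySem.Int.mod_eq_emod_of_pos hNpos]
    have hr0 : 0 ≤ r := by rw [hre]; exact Int.emod_nonneg _ (by omega)
    have hgcd : Int.gcd n r = Int.gcd n |step| := by rw [hre]; exact gcd_emod_right_aux n |step|
    have hBsimp : max_rotations_alt iterable step = PySem.Int.floordiv n (Int.gcd n r) := by
      simp only [max_rotations_alt, ← hn, if_neg h0, hgcd]
    have hcs : constrain_step iterable step = if step < 0 then -r else r := by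
      simp only [constrain_step, ← hn, if_neg h0, ← hrdef]
    by_cases hrz : r = 0
    · -- constrained step is 0: A returns 1; gcd n |step| = n so B returns n // n = 1
      have hA : max_rotations iterable step = 1 := by
        simp only [max_rotations, ← hn, if_neg h0, hcs, hrz]
        simp
      have hgd : Int.gcd n r = n.toNat := by rw [hrz]; simp [Int.gcd]; omega
      rw [hA, hBsimp, hgd]
      rw [PySem.Int.floordiv_eq_ediv_of_pos (by omega)]
      rw [show ((n.toNat : Nat) : Int) = n by omega, Int.ediv_self (by omega)]
    · have hrpos : 0 < r := by omega
      have hcsne : constrain_step iterable step ≠ 0 := by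
        rw [hcs]; split_ifs <;> omega
      have habs : |constrain_step iterable step| = r := by
        rw [hcs]; split_ifs <;> simp [abs_of_nonneg hr0]
      have hA : max_rotations iterable step
          = PySem.Int.floordiv (n * findLoopsA n r r.toNat 1) r := by
        simp only [max_rotations, ← hn, if_neg h0, if_neg hcsne, habs]
      rw [hA, hBsimp, loop_result n r hNpos hrpos]
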